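-- pv_equiv track=rewrite | github.com/samarthjain2002/Leetcode-Solutions | Easy/[2243] Calculate Digit Sum of a String/[2243] Calculate Digit Sum of a String.py | digitSum
-- ===== SOURCE A (Python) =====
-- def digitSum(s, k):
--     """
--     :type s: str
--     :type k: int
--     :rtype: str
--     """
--
--     count = 0
--     s2 = ""
--
--     while len(s) > k:
--         for i in range(0,len(s)):
--             count = count + int(s[i])
--             if ((i+1)%k == 0 or i == len(s)-1):
--                 s2 = s2 + str(count)
--                 count = 0
--         s = s2
--         s2 = ""
--
--     return s
-- ===== SOURCE B (Python) =====
-- def digitSum(s, k):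
--     # Recursive bucket-accumulation rewrite: base case returns s; otherwise one
--     # pass adds each digit into a preallocated array of group totals indexed by
--     # i // k (no boundary test, no running-count emission, no slicing), then
--     # recurses on the joined totals.
--     if len(s) <= k:
--         return s
--     groups = [0] * ((len(s) + k - 1) // k)
--     for i, c in enumerate(s):
--         groups[i // k] += int(c)
--     return digitSum("".join(str(g) for g in groups), k)
-- ===== Notes on version B (the rewrite author's own statement) =====
-- stated objective: alternative
-- what changed: Replaces A's imperative while loop with recursion and its running-count/boundary-emit scan with a single enumerate pass that adds each digit into a preallocated bucket array indexed by i//k, joining the bucket totals; no modulo boundary test, running count or slicing remains.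
import Mathlib
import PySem

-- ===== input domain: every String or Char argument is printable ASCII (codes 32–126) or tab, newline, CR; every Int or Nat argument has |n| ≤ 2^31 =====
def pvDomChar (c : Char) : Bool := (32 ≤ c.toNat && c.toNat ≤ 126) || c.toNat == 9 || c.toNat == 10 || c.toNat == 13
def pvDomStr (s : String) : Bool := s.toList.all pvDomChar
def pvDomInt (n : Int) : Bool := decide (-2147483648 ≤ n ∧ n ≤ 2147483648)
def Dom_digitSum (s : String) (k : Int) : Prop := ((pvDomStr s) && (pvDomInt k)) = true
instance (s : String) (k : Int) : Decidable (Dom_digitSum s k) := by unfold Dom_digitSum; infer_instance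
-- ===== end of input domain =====

-- B replaces A's while loop + running-count/boundary-emit scan by recursion over a
-- bucket-array pass indexed by i // k (alternative decomposition, same cost).

-- int(c) for a 1-char string, as both Pythons apply it; none (= ValueError, a non-digit char) is excluded by Pre_digitSum
def pvDigitVal (c : Char) : Int := (PySem.Int.ofChars? [c]).getD 0

-- fuel for A's outer `while` / B's recursion: on Pre_ inputs the pair (digit sum, length)
-- strictly decreases each pass, so at most digit-sum + length passes happen
def pvFuel (s : List Char) : Nat := s.foldl (fun a c => a + c.toNat) 0 + s.length + 1

-- ===== PORT A =====
-- one pass of A's inner `for i in range(0,len(s))` loop: state (count, s2)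
def pvPassA (s : List Char) (k : Int) : List Char :=
  ((PySem.List.pyRange 0 (s.length : Int) 1).foldl
    (fun (st : Int × List Char) i =>
      let count := st.1 + pvDigitVal (PySem.List.pyGetD s i ' ')
      if PySem.Int.mod (i + 1) k = 0 ∨ i = (s.length : Int) - 1 then
        (0, st.2 ++ PySem.Int.toChars count)
      else (count, st.2))
    (0, [])).2

-- A's `while len(s) > k` loop (fuel-bounded; pvFuel suffices on Pre_ inputs)
def pvLoopA : Nat → List Char → Int → List Char
  | 0, s, _ => s
  | fuel + 1, s, k => if (s.length : Int) > k then pvLoopA fuel (pvPassA s k) k else s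

def digitSum (s : String) (k : Int) : String :=
  String.mk (pvLoopA (pvFuel s.toList) s.toList k)

-- ===== PORT B =====
-- B's `for i, c in enumerate(s): groups[i // k] += int(c)` pass; the Python index
-- i // k is in range for every reached element, so List.set/getD is an exact port here
def pvBuckB (k : Int) : List Char → Int → List Int → List Int
  | [], _, g => g
  | c :: t, i, g =>
      let j := (PySem.Int.floordiv i k).toNat
      pvBuckB k t (i + 1) (g.set j (g.getD j 0 + pvDigitVal c))

-- groups = [0] * ((len(s) + k - 1) // k);  "".join(str(g) for g in groups)
def pvPassB (s : List Char) (k : Int) : List Char :=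
  ((pvBuckB k s 0
      (List.replicate (PySem.Int.floordiv ((s.length : Int) + k - 1) k).toNat 0)).map
    PySem.Int.toChars).flatten

-- B's recursion: if len(s) <= k return s else recurse on the joined bucket totals
def pvLoopB : Nat → List Char → Int → List Char
  | 0, s, _ => s
  | fuel + 1, s, k => if (s.length : Int) > k then pvLoopB fuel (pvPassB s k) k else s

def digitSum_alt (s : String) (k : Int) : String :=
  String.mk (pvLoopB (pvFuel s.toList) s.toList k)

-- ===== PRECONDITION & SPEC =====
-- Pre_ excludes exactly the inputs where the Python A does not return: k ≤ 0 and k = 1 with len(s) > 1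
-- make A's while loop spin forever (or hit `% 0`), and a non-digit char with len(s) > k raises ValueError.
def Pre_digitSum (s : String) (k : Int) : Prop :=
  (0 ≤ k ∧ (s.toList.length : Int) ≤ k) ∨ (2 ≤ k ∧ ∀ c ∈ s.toList, '0' ≤ c ∧ c ≤ '9')
instance (s : String) (k : Int) : Decidable (Pre_digitSum s k) := by unfold Pre_digitSum; infer_instance

def pvWitness_digitSum : String × Int := ("12", 2)

def Spec_digitSum (s : String) (k : Int) (out : String) : Prop := out = digitSum_alt s k
instance (s : String) (k : Int) (out : String) : Decidable (Spec_digitSum s k out) := by unfold Spec_digitSum; infer_instance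

-- ===== CLAIM (what is proved, stated in full; the proofs are below) =====
def Claim_equal_digitSum : Prop := ∀ (s : String) (k : Int), Dom_digitSum s k → Pre_digitSum s k → Spec_digitSum s k (digitSum s k)

-- ===== LEMMAS AND PROOFS =====

-- proof-side recursive reading of A's inner loop: i = current index, count = running sum,
-- the `i == len(s)-1` test becomes the structural `rest = []`
def pvGoA (k : Int) : List Char → Int → Int → List Char → List Char
  | [], _, _, acc => acc
  | c :: rest, i, count, acc =>
      let count' := count + pvDigitVal c
      if PySem.Int.mod (i + 1) k = 0 ∨ rest = [] then
        pvGoA k rest (i + 1) 0 (acc ++ PySem.Int.toChars count')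
      else
        pvGoA k rest (i + 1) count' acc

-- proof-side chunk decomposition both passes are reduced to: per-chunk digit sum, rendered
def pvChunkSum (chunk : List Char) : Int :=
  chunk.foldl (fun t c => t + pvDigitVal c) 0

def pvChunksB : Nat → List Char → Int → List (List Char)
  | 0, _, _ => []
  | _ + 1, [], _ => []
  | fuel + 1, rest, k =>
      PySem.Int.toChars (pvChunkSum (PySem.List.slice rest none (some k)))
        :: pvChunksB fuel (PySem.List.slice rest (some k) none) k

lemma pvMod_zero (k : Int) (hk : 0 < k) : PySem.Int.mod 0 k = 0 := by
  rw [PySem.Int.mod_eq_emod_of_pos hk]; simp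

lemma pvEmod_succ (i k : Int) : (i + 1) % k = (i % k + 1) % k := by
  conv_lhs => rw [show i = k * (i / k) + i % k from (Int.ediv_add_emod i k).symm]
  rw [show k * (i / k) + i % k + 1 = i % k + 1 + k * (i / k) by ring]
  rw [Int.add_mul_emod_self_left]

lemma pvMod_succ_iff (i k : Int) (hk : 0 < k) :
    PySem.Int.mod (i + 1) k = 0 ↔ PySem.Int.mod i k = k - 1 := by
  rw [PySem.Int.mod_eq_emod_of_pos hk, PySem.Int.mod_eq_emod_of_pos hk, pvEmod_succ i k]
  have h0 : 0 ≤ i % k := Int.emod_nonneg i (by omega)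
  have h1 : i % k < k := Int.emod_lt_of_pos i hk
  constructor
  · intro h
    by_contra hne
    rw [Int.emod_eq_of_lt (by omega) (by omega)] at h
    omega
  · intro h
    rw [h, show k - 1 + 1 = k by ring, Int.emod_self]

lemma pvMod_succ_eq (i k : Int) (hk : 0 < k) (h : PySem.Int.mod i k ≠ k - 1) :
    PySem.Int.mod (i + 1) k = PySem.Int.mod i k + 1 := by
  have h0 : 0 ≤ PySem.Int.mod i k := PySem.Int.mod_nonneg i hk
  have h1 : PySem.Int.mod i k < k := PySem.Int.mod_lt i hk
  rw [PySem.Int.mod_eq_emod_of_pos hk] at h h0 h1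
  rw [PySem.Int.mod_eq_emod_of_pos hk, PySem.Int.mod_eq_emod_of_pos hk, pvEmod_succ i k,
    Int.emod_eq_of_lt (by omega) (by omega)]

-- A's foldl over range(0, len(s)) equals pvGoA, one index per list element
lemma pvBridgeA (k : Int) (s : List Char) :
    ∀ (rest pre : List Char), s = pre ++ rest → ∀ (count : Int) (acc : List Char),
    ((PySem.List.pyRange (pre.length : Int) (s.length : Int) 1).foldl
      (fun (st : Int × List Char) i =>
        let c2 := st.1 + pvDigitVal (PySem.List.pyGetD s i ' ')
        if PySem.Int.mod (i + 1) k = 0 ∨ i = (s.length : Int) - 1 then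
          (0, st.2 ++ PySem.Int.toChars c2)
        else (c2, st.2))
      (count, acc)).2
    = pvGoA k rest (pre.length : Int) count acc := by
  intro rest
  induction rest with
  | nil =>
    intro pre h count acc
    subst h
    rw [PySem.List.pyRange_one_eq_nil (by simp)]
    simp [pvGoA]
  | cons c rest ih =>
    intro pre h count acc
    subst h
    have hlen : (pre ++ c :: rest).length = pre.length + rest.length + 1 := by
      simp; omega
    rw [PySem.List.pyRange_one_cons (by rw [hlen]; push_cast; omega)]
    rw [List.foldl_cons]
    have hget : PySem.List.pyGetD (pre ++ c :: rest) (pre.length : Int) ' ' = c := by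
      rw [PySem.List.pyGetD_natCast]
      simp [List.getD, List.getElem?_append_right (Nat.le_refl pre.length)]
    have hlast : ((pre.length : Int) = ((pre ++ c :: rest).length : Int) - 1) ↔ rest = [] := by
      rw [hlen]; push_cast
      constructor
      · intro h2
        have : rest.length = 0 := by omega
        exact List.length_eq_zero_iff.mp this
      · intro h2; subst h2; simp
    have hplen : ((pre ++ [c]).length : Int) = (pre.length : Int) + 1 := by simp
    by_cases hc : PySem.Int.mod ((pre.length : Int) + 1) k = 0 ∨ rest = []
    · have hc' : PySem.Int.mod ((pre.length : Int) + 1) k = 0 ∨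
          (pre.length : Int) = ((pre ++ c :: rest).length : Int) - 1 := by
        rcases hc with hc | hc
        · exact Or.inl hc
        · exact Or.inr (hlast.mpr hc)
      simp only [hget, if_pos hc']
      rw [show pvGoA k (c :: rest) (pre.length : Int) count acc
            = pvGoA k rest ((pre.length : Int) + 1) 0
                (acc ++ PySem.Int.toChars (count + pvDigitVal c)) by
        simp only [pvGoA, if_pos hc]]
      have hih := ih (pre ++ [c]) (by simp) 0 (acc ++ PySem.Int.toChars (count + pvDigitVal c))
      rw [hplen] at hih
      exact hih
    · push_neg at hc
      have hc' : ¬ (PySem.Int.mod ((pre.length : Int) + 1) k = 0 ∨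
          (pre.length : Int) = ((pre ++ c :: rest).length : Int) - 1) := by
        push_neg
        exact ⟨hc.1, fun h2 => hc.2 (hlast.mp h2)⟩
      simp only [hget, if_neg hc']
      rw [show pvGoA k (c :: rest) (pre.length : Int) count acc
            = pvGoA k rest ((pre.length : Int) + 1) (count + pvDigitVal c) acc by
        simp only [pvGoA, if_neg (not_or.mpr hc)]]
      have hih := ih (pre ++ [c]) (by simp) (count + pvDigitVal c) acc
      rw [hplen] at hih
      exact hih

lemma pvPassA_eq_goA (s : List Char) (k : Int) : pvPassA s k = pvGoA k s 0 0 [] := by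
  have := pvBridgeA k s s [] rfl 0 []
  simpa [pvPassA] using this

lemma pvChunkSum_cons (c : Char) (t : List Char) :
    pvChunkSum (c :: t) = pvDigitVal c + pvChunkSum t := by
  have h : ∀ (l : List Char) (a : Int),
      l.foldl (fun t c => t + pvDigitVal c) a = a + l.foldl (fun t c => t + pvDigitVal c) 0 := by
    intro l
    induction l with
    | nil => intro a; simp
    | cons x xs ih =>
      intro a
      simp only [List.foldl_cons]
      rw [ih]
      conv_rhs => rw [ih]
      ring
  simp only [pvChunkSum, List.foldl_cons, Int.zero_add]
  exact h t (pvDigitVal c)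

lemma pvChunksB_nil (f : Nat) (k : Int) : pvChunksB f [] k = [] := by
  cases f <;> rfl

lemma pvChunksB_fuel (k : Int) (hk : 0 < k) :
    ∀ (f g : Nat) (rest : List Char), rest.length ≤ f → rest.length ≤ g →
    pvChunksB f rest k = pvChunksB g rest k := by
  intro f
  induction f with
  | zero =>
    intro g rest hf _
    have : rest = [] := List.length_eq_zero_iff.mp (Nat.le_zero.mp hf)
    subst this
    rw [pvChunksB_nil, pvChunksB_nil]
  | succ f ih =>
    intro g rest hf hg
    cases rest with
    | nil => rw [pvChunksB_nil, pvChunksB_nil]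
    | cons c t =>
      cases g with
      | zero => simp at hg
      | succ g =>
        simp only [pvChunksB]
        congr 1
        apply ih
        · rw [PySem.List.slice_from _ (le_of_lt hk)]
          simp at hf ⊢
          have : 1 ≤ k.toNat := by omega
          omega
        · rw [PySem.List.slice_from _ (le_of_lt hk)]
          simp at hg ⊢
          have : 1 ≤ k.toNat := by omega
          omega

-- the central lemma on the A side: A's pass, read at a chunk boundary offset, equals the chunk decomposition
lemma pvChunkMain (k : Int) (hk : 0 < k) :
    ∀ (rest : List Char) (i count : Int) (acc : List Char), 0 ≤ i →
    pvGoA k rest i count acc =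
      if rest = [] then acc
      else acc ++ PySem.Int.toChars (count + pvChunkSum (rest.take (k - PySem.Int.mod i k).toNat))
              ++ (pvChunksB (rest.drop (k - PySem.Int.mod i k).toNat).length
                    (rest.drop (k - PySem.Int.mod i k).toNat) k).flatten := by
  intro rest
  induction rest with
  | nil => intro i count acc hi; simp [pvGoA]
  | cons c t ih =>
    intro i count acc hi
    have h0 : 0 ≤ PySem.Int.mod i k := PySem.Int.mod_nonneg i hk
    have h1 : PySem.Int.mod i k < k := PySem.Int.mod_lt i hk
    rw [if_neg (by simp)]
    by_cases hz : PySem.Int.mod (i + 1) k = 0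
    · -- chunk boundary: i % k = k - 1, current chunk is exactly [c]
      have hj : PySem.Int.mod i k = k - 1 := (pvMod_succ_iff i k hk).mp hz
      have hr : (k - PySem.Int.mod i k).toNat = 1 := by rw [hj]; omega
      rw [hr]
      rw [show pvGoA k (c :: t) i count acc
            = pvGoA k t (i + 1) 0 (acc ++ PySem.Int.toChars (count + pvDigitVal c)) by
        simp only [pvGoA, if_pos (Or.inl hz)]]
      rw [ih (i + 1) 0 (acc ++ PySem.Int.toChars (count + pvDigitVal c)) (by omega)]
      cases t with
      | nil =>
        simp [pvChunksB_nil, pvChunkSum]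
      | cons c' t' =>
        rw [if_neg (by simp)]
        have hk1 : 1 ≤ k.toNat := by omega
        have hfuel : pvChunksB t'.length ((c' :: t').drop k.toNat) k
            = pvChunksB ((c' :: t').drop k.toNat).length ((c' :: t').drop k.toNat) k := by
          apply pvChunksB_fuel k hk <;> simp <;> omega
        rw [hz]
        have hstep : (pvChunksB (c' :: t').length (c' :: t') k).flatten
            = PySem.Int.toChars (pvChunkSum ((c' :: t').take k.toNat))
              ++ (pvChunksB ((c' :: t').drop k.toNat).length ((c' :: t').drop k.toNat) k).flatten := by
          show (pvChunksB (t'.length + 1) (c' :: t') k).flatten = _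
          simp only [pvChunksB, PySem.List.slice_to _ (le_of_lt hk),
            PySem.List.slice_from _ (le_of_lt hk), List.flatten_cons, hfuel]
        simp only [List.take_succ_cons, List.drop_succ_cons, List.take_zero, List.drop_zero,
          hstep]
        simp [List.append_assoc, pvChunkSum]
    · -- mid-chunk: i % k < k - 1, c joins the running chunk
      have hj : PySem.Int.mod i k ≠ k - 1 := fun h => hz ((pvMod_succ_iff i k hk).mpr h)
      have hsucc : PySem.Int.mod (i + 1) k = PySem.Int.mod i k + 1 := pvMod_succ_eq i k hk hj
      have hr : (k - PySem.Int.mod i k).toNat = (k - PySem.Int.mod (i + 1) k).toNat + 1 := by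
        rw [hsucc]; omega
      by_cases ht : t = []
      · subst ht
        rw [show pvGoA k [c] i count acc
              = acc ++ PySem.Int.toChars (count + pvDigitVal c) by simp [pvGoA]]
        have hr1 : 1 ≤ (k - PySem.Int.mod i k).toNat := by omega
        rw [List.take_of_length_le (by simpa using hr1), List.drop_of_length_le (by simpa using hr1)]
        simp [pvChunksB_nil, pvChunkSum]
      · rw [show pvGoA k (c :: t) i count acc
              = pvGoA k t (i + 1) (count + pvDigitVal c) acc by
          simp only [pvGoA, if_neg (not_or.mpr ⟨hz, ht⟩)]]
        rw [ih (i + 1) (count + pvDigitVal c) acc (by omega)]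
        rw [if_neg ht, hr]
        simp only [List.take_succ_cons, List.drop_succ_cons, pvChunkSum_cons]
        rw [show count + (pvDigitVal c
              + pvChunkSum (t.take (k - PySem.Int.mod (i + 1) k).toNat))
            = count + pvDigitVal c
              + pvChunkSum (t.take (k - PySem.Int.mod (i + 1) k).toNat) by ring]

lemma pvPassA_chunks (s : List Char) (k : Int) (hk : 0 < k) :
    pvPassA s k = (pvChunksB s.length s k).flatten := by
  rw [pvPassA_eq_goA, pvChunkMain k hk s 0 0 [] (le_refl 0)]
  cases s with
  | nil => simp [pvChunksB_nil]
  | cons c t =>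
    rw [if_neg (by simp), pvMod_zero k hk]
    have hk1 : 1 ≤ k.toNat := by omega
    have hfuel : pvChunksB t.length ((c :: t).drop k.toNat) k
        = pvChunksB ((c :: t).drop k.toNat).length ((c :: t).drop k.toNat) k := by
      apply pvChunksB_fuel k hk <;> simp <;> omega
    have hstep : (pvChunksB (c :: t).length (c :: t) k).flatten
        = PySem.Int.toChars (pvChunkSum ((c :: t).take k.toNat))
          ++ (pvChunksB ((c :: t).drop k.toNat).length ((c :: t).drop k.toNat) k).flatten := by
      show (pvChunksB (t.length + 1) (c :: t) k).flatten = _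
      simp only [pvChunksB, PySem.List.slice_to _ (le_of_lt hk),
        PySem.List.slice_from _ (le_of_lt hk), List.flatten_cons, hfuel]
    rw [hstep]
    simp

-- ===== B-side lemmas: the bucket pass equals the same chunk decomposition =====

lemma pvBuckB_append (k : Int) :
    ∀ (l1 l2 : List Char) (i : Int) (g : List Int),
    pvBuckB k (l1 ++ l2) i g = pvBuckB k l2 (i + (l1.length : Int)) (pvBuckB k l1 i g) := by
  intro l1
  induction l1 with
  | nil => intro l2 i g; simp [pvBuckB]
  | cons c t ih =>
    intro l2 i g
    simp only [List.cons_append, pvBuckB, ih]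
    congr 1
    simp only [List.length_cons]
    push_cast
    ring

-- a whole chunk lands in bucket 0
lemma pvBuckB_head (k : Int) (hk : 0 < k) :
    ∀ (chunk : List Char) (i : Int), 0 ≤ i → i + (chunk.length : Int) ≤ k →
    ∀ (a : Int) (g : List Int),
    pvBuckB k chunk i (a :: g) = (a + pvChunkSum chunk) :: g := by
  intro chunk
  induction chunk with
  | nil => intro i _ _ a g; simp [pvBuckB, pvChunkSum]
  | cons c t ih =>
    intro i hi hle a g
    have hlen : (0 : Int) ≤ t.length := by positivity
    have hik : i < k := by simp at hle; omega
    have hj : PySem.Int.floordiv i k = 0 := by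
      rw [PySem.Int.floordiv_eq_ediv_of_pos hk]
      exact Int.ediv_eq_zero_of_lt hi hik
    simp only [pvBuckB, hj, Int.toNat_zero, List.set_cons_zero, List.getD_cons_zero]
    rw [ih (i + 1) (by omega) (by simp at hle ⊢; omega) (a + pvDigitVal c) g]
    rw [pvChunkSum_cons, add_assoc]

-- indices ≥ k leave bucket 0 alone and act shifted on the tail
lemma pvBuckB_shift (k : Int) (hk : 0 < k) :
    ∀ (t : List Char) (i : Int), 0 ≤ i → ∀ (a : Int) (g : List Int),
    pvBuckB k t (i + k) (a :: g) = a :: pvBuckB k t i g := by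
  intro t
  induction t with
  | nil => intro i _ a g; simp [pvBuckB]
  | cons c t' ih =>
    intro i hi a g
    have hdiv : PySem.Int.floordiv (i + k) k = PySem.Int.floordiv i k + 1 := by
      rw [PySem.Int.floordiv_eq_ediv_of_pos hk, PySem.Int.floordiv_eq_ediv_of_pos hk]
      have := Int.add_mul_ediv_right i 1 (show k ≠ 0 by omega)
      simpa using this
    have hnn : 0 ≤ PySem.Int.floordiv i k := by
      rw [PySem.Int.floordiv_eq_ediv_of_pos hk]
      exact Int.ediv_nonneg hi (le_of_lt hk)
    have htn : (PySem.Int.floordiv (i + k) k).toNat = (PySem.Int.floordiv i k).toNat + 1 := by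
      rw [hdiv]; omega
    simp only [pvBuckB, htn, List.set_cons_succ, List.getD_cons_succ]
    rw [show i + k + 1 = (i + 1) + k by ring]
    exact ih (i + 1) (by omega) a _

-- ceiling-division arithmetic for the bucket count
lemma pvCeil_succ (n k : Int) (hk : 0 < k) (hn : 0 < n) :
    (PySem.Int.floordiv (n + k - 1) k).toNat
      = (PySem.Int.floordiv ((n - k) + k - 1) k).toNat + 1 := by
  rw [PySem.Int.floordiv_eq_ediv_of_pos hk, PySem.Int.floordiv_eq_ediv_of_pos hk]
  rw [show n + k - 1 = (n - 1) + 1 * k by ring, show (n - k) + k - 1 = n - 1 by ring,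
    Int.add_mul_ediv_right _ _ (show k ≠ 0 by omega)]
  have h3 : 0 ≤ (n - 1) / k := Int.ediv_nonneg (by omega) (by omega)
  omega

lemma pvCeil_zero (k : Int) (hk : 0 < k) :
    PySem.Int.floordiv (k - 1) k = 0 := by
  rw [PySem.Int.floordiv_eq_ediv_of_pos hk]
  exact Int.ediv_eq_zero_of_lt (by omega) (by omega)

-- the central lemma on the B side (fueled like pvChunksB)
lemma pvBuckMain (k : Int) (hk : 0 < k) :
    ∀ (f : Nat) (s : List Char), s.length ≤ f →
    (pvBuckB k s 0
        (List.replicate (PySem.Int.floordiv ((s.length : Int) + k - 1) k).toNat 0)).map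
      PySem.Int.toChars = pvChunksB f s k := by
  intro f
  induction f with
  | zero =>
    intro s hf
    have : s = [] := List.length_eq_zero_iff.mp (Nat.le_zero.mp hf)
    subst this
    simp [pvBuckB, pvChunksB_nil, pvCeil_zero k hk]
  | succ f ih =>
    intro s hf
    cases s with
    | nil => simp [pvBuckB, pvChunksB_nil, pvCeil_zero k hk]
    | cons c t =>
      have hk1 : 1 ≤ k.toNat := by omega
      have hn : 0 < (((c :: t).length : Int)) := by
        simp only [List.length_cons]; push_cast; omega
      have hm := pvCeil_succ ((c :: t).length : Int) k hk hn
      have hunfold : pvChunksB (f + 1) (c :: t) k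
          = PySem.Int.toChars (pvChunkSum ((c :: t).take k.toNat))
              :: pvChunksB f ((c :: t).drop k.toNat) k := by
        simp only [pvChunksB, PySem.List.slice_to _ (le_of_lt hk),
          PySem.List.slice_from _ (le_of_lt hk)]
      have hsplit : ∀ g : List Int, pvBuckB k (c :: t) 0 g
          = pvBuckB k ((c :: t).drop k.toNat)
              (0 + (((c :: t).take k.toNat).length : Int))
              (pvBuckB k ((c :: t).take k.toNat) 0 g) := by
        intro g
        conv_lhs => rw [show (c :: t) = (c :: t).take k.toNat ++ (c :: t).drop k.toNat from
          (List.take_append_drop _ _).symm]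
        rw [pvBuckB_append]
      rw [hunfold, hm, List.replicate_succ, hsplit]
      have htake : ((c :: t).take k.toNat).length ≤ k.toNat := by
        rw [List.length_take]; omega
      rw [pvBuckB_head k hk ((c :: t).take k.toNat) 0 (le_refl 0) (by omega) 0 _]
      by_cases hbig : k.toNat < (c :: t).length
      · -- the rest is nonempty: shift lemma handles buckets ≥ 1
        have hlt : ((c :: t).take k.toNat).length = k.toNat := by
          rw [List.length_take]; omega
        have hdl : ((c :: t).drop k.toNat).length = (c :: t).length - k.toNat := by
          rw [List.length_drop]
        rw [show (0 : Int) + (((c :: t).take k.toNat).length : Int) = 0 + k by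
          rw [hlt]; omega]
        rw [pvBuckB_shift k hk ((c :: t).drop k.toNat) 0 (le_refl 0)]
        have hcount : ((c :: t).length : Int) - k + k - 1
            = (((c :: t).drop k.toNat).length : Int) + k - 1 := by
          rw [hdl]; push_cast; omega
        rw [hcount]
        have := ih ((c :: t).drop k.toNat) (by rw [hdl]; simp at hf ⊢; omega)
        simp only [List.map_cons, this, Int.zero_add]
      · -- s fits in one chunk: the rest is empty
        have hdrop : (c :: t).drop k.toNat = [] := by
          apply List.drop_eq_nil_of_le; omega
        have hm0 : (PySem.Int.floordiv (((c :: t).length : Int) - k + k - 1) k).toNat = 0 := by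
          rw [PySem.Int.floordiv_eq_ediv_of_pos hk,
            show ((c :: t).length : Int) - k + k - 1 = ((c :: t).length : Int) - 1 by ring]
          have hle : ((c :: t).length : Int) ≤ k := by omega
          rw [Int.ediv_eq_zero_of_lt (by omega) (by omega)]
          rfl
        rw [hdrop, hm0]
        simp [pvBuckB, pvChunksB_nil]

lemma pvPass_eq (s : List Char) (k : Int) (hk : 0 < k) : pvPassA s k = pvPassB s k := by
  rw [pvPassA_chunks s k hk]
  unfold pvPassB
  rw [pvBuckMain k hk s.length s (le_refl _)]

lemma pvLoop_eq (k : Int) (hk : 0 < k) :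
    ∀ (fuel : Nat) (s : List Char), pvLoopA fuel s k = pvLoopB fuel s k := by
  intro fuel
  induction fuel with
  | zero => intro s; rfl
  | succ f ih =>
    intro s
    simp only [pvLoopA, pvLoopB]
    by_cases h : (s.length : Int) > k
    · rw [if_pos h, if_pos h, pvPass_eq s k hk, ih]
    · rw [if_neg h, if_neg h]

lemma pvLoop_stop (f : Nat) (s : List Char) (k : Int) (h : ¬ ((s.length : Int) > k)) :
    pvLoopA f s k = s ∧ pvLoopB f s k = s := by
  cases f <;> simp [pvLoopA, pvLoopB, h]

-- ===== VERDICT (by name: the statement is the Claim_ definition above) =====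
theorem digitSum_spec : Claim_equal_digitSum := by
  intro s k _ hpre
  unfold Spec_digitSum digitSum digitSum_alt
  rcases hpre with ⟨_, hlen⟩ | ⟨hk2, _⟩
  · rw [(pvLoop_stop _ _ _ (by omega)).1, (pvLoop_stop _ _ _ (by omega)).2]
  · rw [pvLoop_eq k (by omega)]
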